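-- pv_equiv track=rewrite | github.com/shantanujoshi25/Bingo | backend/game_logic.py | validate_numbers_selection
-- ===== SOURCE A (Python) =====
-- from typing import List, Dict, Any, Optional
--
-- TOTAL_BINGO_NUMBERS = 50 # Numbers 1-50
--
-- def validate_numbers_selection(numbers: List[int]) -> bool:
--     """Validates player's selected numbers."""
--     if len(numbers) != 9:
--         return False
--     if len(set(numbers)) != 9: # Check for uniqueness
--         return False
--     if not all(1 <= num <= TOTAL_BINGO_NUMBERS for num in numbers):
--         return False
--     return True
-- ===== SOURCE B (Python) =====
-- TOTAL_BINGO_NUMBERS = 50 # Numbers 1-50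
--
-- def validate_numbers_selection(numbers):
--     """Sort-based: after sorting, uniqueness is strict adjacency and the range
--     check reduces to the two extremes (min and max)."""
--     if len(numbers) != 9:
--         return False
--     s = sorted(numbers)
--     if s[0] < 1 or s[8] > TOTAL_BINGO_NUMBERS:
--         return False
--     return all(s[i] != s[i + 1] for i in range(8))
-- ===== Notes on version B (the rewrite author's own statement) =====
-- stated objective: alternative
-- what changed: Replaces A's set-based uniqueness test and full-list range scan with a sort: after sorting, uniqueness becomes a strict-adjacency check over consecutive sorted elements and the 1..50 range check reduces to inspecting only the first (minimum) and last (maximum) sorted element.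
import Mathlib
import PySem

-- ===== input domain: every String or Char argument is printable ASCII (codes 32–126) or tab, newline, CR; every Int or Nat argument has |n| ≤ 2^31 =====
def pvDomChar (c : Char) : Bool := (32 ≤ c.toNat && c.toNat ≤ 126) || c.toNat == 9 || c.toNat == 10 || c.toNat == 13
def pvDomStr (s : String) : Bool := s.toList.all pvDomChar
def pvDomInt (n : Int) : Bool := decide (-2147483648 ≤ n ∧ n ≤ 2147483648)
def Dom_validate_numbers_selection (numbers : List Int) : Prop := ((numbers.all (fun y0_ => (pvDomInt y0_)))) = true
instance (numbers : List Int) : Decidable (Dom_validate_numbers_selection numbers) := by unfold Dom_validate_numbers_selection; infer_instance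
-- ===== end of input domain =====

-- B replaces A's set-based uniqueness and full-list range scan with a sort: strict adjacency for uniqueness, min/max for the range; objective: alternative (same cost).


-- ===== PORT A =====
def validate_numbers_selection (numbers : List Int) : Bool :=
  if numbers.length ≠ 9 then false
  else if (PySem.Set.ofList numbers).length ≠ 9 then false
  else if ¬ (numbers.all (fun num => decide (1 ≤ num) && decide (num ≤ 50))) then false
  else true

-- ===== PORT B =====
def validate_numbers_selection_alt (numbers : List Int) : Bool :=
  if numbers.length ≠ 9 then false
  else
    let s := PySem.List.sorted numbers (fun x => x) false
    if PySem.List.pyGetD s 0 0 < 1 ∨ 50 < PySem.List.pyGetD s 8 0 then false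
    else (PySem.List.pyRange 0 8 1).all
      (fun i => !(PySem.List.pyGetD s i 0 == PySem.List.pyGetD s (i + 1) 0))

-- ===== PRECONDITION & SPEC =====
def Spec_validate_numbers_selection (numbers : List Int) (out : Bool) : Prop := out = validate_numbers_selection_alt numbers
instance (numbers : List Int) (out : Bool) : Decidable (Spec_validate_numbers_selection numbers out) := by unfold Spec_validate_numbers_selection; infer_instance

-- ===== CLAIM =====
def Claim_equal_validate_numbers_selection : Prop := ∀ (numbers : List Int), Dom_validate_numbers_selection numbers → Spec_validate_numbers_selection numbers (validate_numbers_selection numbers)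

-- ===== LEMMAS AND PROOFS =====

-- set(xs) lists a subsequence of xs (first occurrences in order)
theorem ofList_sublist (xs : List Int) : List.Sublist (PySem.Set.ofList xs) xs := by
  induction xs using List.reverseRecOn with
  | nil => simp [PySem.Set.ofList]
  | append_singleton ys y ih =>
      rw [PySem.Set.ofList_append_singleton, PySem.Set.add_eq_ite]
      split
      · exact ih.trans (List.sublist_append_left ys [y])
      · exact ih.append (List.Sublist.refl [y])

theorem len_ofList_eq_iff (xs : List Int) :
    (PySem.Set.ofList xs).length = xs.length ↔ xs.Nodup := by
  constructor
  · intro h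
    have := (ofList_sublist xs).eq_of_length h
    rw [← this]; exact PySem.Set.nodup_ofList xs
  · intro h; rw [PySem.Set.ofList_eq_self_of_nodup xs h]

-- characterisation of A
theorem A_char (numbers : List Int) :
    validate_numbers_selection numbers = true ↔
      numbers.length = 9 ∧ numbers.Nodup ∧ ∀ x ∈ numbers, 1 ≤ x ∧ x ≤ 50 := by
  unfold validate_numbers_selection
  by_cases h9 : numbers.length = 9
  · by_cases hn : numbers.Nodup
    · have hofl : (PySem.Set.ofList numbers).length = 9 := by
        rw [(len_ofList_eq_iff numbers).mpr hn, h9]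
      simp [h9, hofl, hn, List.all_eq_true]
    · have hofl : (PySem.Set.ofList numbers).length ≠ 9 := fun h =>
        hn ((len_ofList_eq_iff numbers).mp (h.trans h9.symm))
      simp [h9, hofl, hn]
  · simp [h9]

-- characterisation of B
theorem B_char (numbers : List Int) :
    validate_numbers_selection_alt numbers = true ↔
      numbers.length = 9 ∧ numbers.Nodup ∧ ∀ x ∈ numbers, 1 ≤ x ∧ x ≤ 50 := by
  unfold validate_numbers_selection_alt
  by_cases h9 : numbers.length = 9
  · rw [if_neg (show ¬ (numbers.length ≠ 9) from fun h => h h9)]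
    set s := PySem.List.sorted numbers (fun x => x) false with hs
    have hlen : s.length = 9 := by rw [hs, PySem.List.length_sorted, h9]
    have hperm : s.Perm numbers := PySem.List.sorted_perm numbers (fun x => x) false
    have mono : ∀ p q : Nat, p ≤ q → q < 9 → s.getD p 0 ≤ s.getD q 0 := by
      intro p q hpq hq
      have hq' : q < s.length := by omega
      have hp' : p < s.length := by omega
      rw [List.getD_eq_getElem _ _ hp', List.getD_eq_getElem _ _ hq']
      exact PySem.List.sorted_id_getElem_mono numbers hpq hq'
    have hmem : ∀ k : Nat, k < 9 → s.getD k 0 ∈ numbers := by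
      intro k hk
      rw [List.getD_eq_getElem _ _ (by omega)]
      exact hperm.mem_iff.mp (List.getElem_mem _)
    simp only [PySem.List.pyGetD_ofNat']
    split_ifs with hrange
    · simp only [false_iff]
      rintro ⟨-, -, hall⟩
      rcases hrange with h | h
      · exact absurd (hall _ (hmem 0 (by omega))).1 (by omega)
      · exact absurd (hall _ (hmem 8 (by omega))).2 (by omega)
    · rw [not_or, not_lt, not_lt] at hrange
      have hallform : ((PySem.List.pyRange 0 8 1).all
          (fun i => !(PySem.List.pyGetD s i 0 == PySem.List.pyGetD s (i + 1) 0)) = true) ↔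
          ∀ k : Nat, k < 8 → s.getD k 0 ≠ s.getD (k + 1) 0 := by
        rw [List.all_eq_true]
        constructor
        · intro h k hk
          have := h (k : Int) (by rw [PySem.List.mem_pyRange_one]; omega)
          rw [show ((k : Int) + 1) = ((k + 1 : Nat) : Int) by push_cast; ring,
              PySem.List.pyGetD_natCast, PySem.List.pyGetD_natCast] at this
          simpa using this
        · intro h i hi
          rw [PySem.List.mem_pyRange_one] at hi
          obtain ⟨k, rfl⟩ : ∃ k : Nat, (k : Int) = i := ⟨i.toNat, by omega⟩
          rw [show ((k : Int) + 1) = ((k + 1 : Nat) : Int) by push_cast; ring,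
              PySem.List.pyGetD_natCast, PySem.List.pyGetD_natCast]
          simpa using h k (by omega)
      rw [hallform]
      constructor
      · intro hadj
        refine ⟨h9, ?_, ?_⟩
        · have hpw : s.Pairwise (· < ·) := by
            rw [List.pairwise_iff_getElem]
            intro p q hp hq hpq
            rw [hlen] at hp hq
            have h1 : s.getD p 0 ≤ s.getD (p + 1) 0 := mono p (p + 1) (by omega) (by omega)
            have h2 : s.getD (p + 1) 0 ≤ s.getD q 0 := mono (p + 1) q (by omega) (by omega)
            have hne := hadj p (by omega)
            rw [List.getD_eq_getElem _ _ (by omega), List.getD_eq_getElem _ _ (by omega)] at h1 hne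
            rw [List.getD_eq_getElem _ _ (by omega), List.getD_eq_getElem _ _ (by omega)] at h2
            omega
          exact hperm.nodup_iff.mp hpw.nodup
        · intro x hx
          obtain ⟨i, hi, hix⟩ := List.getElem_of_mem (hperm.mem_iff.mpr hx)
          have hlow : s.getD 0 0 ≤ s.getD i 0 := mono 0 i (by omega) (by omega)
          have hhigh : s.getD i 0 ≤ s.getD 8 0 := mono i 8 (by omega) (by omega)
          rw [List.getD_eq_getElem _ _ hi, hix] at hlow hhigh
          omega
      · rintro ⟨-, hnodup, -⟩
        intro k hk
        have hns : s.Nodup := hperm.nodup_iff.mpr hnodup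
        rw [List.getD_eq_getElem _ _ (by omega), List.getD_eq_getElem _ _ (by omega)]
        intro hEq
        have := List.nodup_iff_injective_getElem.mp hns
          (a₁ := ⟨k, by omega⟩) (a₂ := ⟨k + 1, by omega⟩) hEq
        simp at this
  · simp [h9]

-- ===== VERDICT =====
theorem validate_numbers_selection_spec : Claim_equal_validate_numbers_selection := by
  intro numbers _
  unfold Spec_validate_numbers_selection
  rw [Bool.eq_iff_iff, A_char, B_char]
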